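-- pv_equiv track=rewrite | github.com/MilojevicV/University | recursion/count_occurences_in_array.py | count
-- ===== SOURCE A (Python) =====
-- def count(a, x, i):
--     if i == len(a) - 1:
--         if a[i] == x:
--             return 1
--         return 0
--
--     num_of_occurences_in_the_rest_of_array = count(a, x, i + 1)
--
--     if a[i] == x:
--         return num_of_occurences_in_the_rest_of_array + 1
--
--     return num_of_occurences_in_the_rest_of_array
-- ===== SOURCE B (Python) =====
-- def count(a, x, i):
--     total = 0
--     for j in range(i, len(a)):
--         if a[j] == x:
--             total += 1
--     return total
-- ===== Notes on version B (the rewrite author's own statement) =====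
-- stated objective: simpler
-- what changed: Replaces the non-tail recursion that builds the answer on the way back up with a single forward loop over range(i, len(a)) maintaining a running total.
import Mathlib
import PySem

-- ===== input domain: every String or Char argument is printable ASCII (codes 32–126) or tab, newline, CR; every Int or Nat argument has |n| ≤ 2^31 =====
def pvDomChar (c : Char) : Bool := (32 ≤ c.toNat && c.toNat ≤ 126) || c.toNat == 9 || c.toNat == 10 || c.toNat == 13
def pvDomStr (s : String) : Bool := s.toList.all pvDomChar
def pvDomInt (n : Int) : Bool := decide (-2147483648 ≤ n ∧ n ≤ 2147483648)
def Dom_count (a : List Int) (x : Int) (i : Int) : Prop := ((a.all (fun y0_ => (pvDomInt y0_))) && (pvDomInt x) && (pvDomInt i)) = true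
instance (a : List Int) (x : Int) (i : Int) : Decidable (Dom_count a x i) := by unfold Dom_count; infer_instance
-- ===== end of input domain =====

-- B replaces A's non-tail recursion with a single forward accumulator loop over range(i, len(a));
-- same comparisons, same values wherever A returns (Pre_ excludes exactly the inputs where A raises).


-- ===== PORT A =====
-- A's recursion advances i by 1 until i == len(a)-1; in Lean it is written with a fuel
-- parameter large enough (2*len(a)+1) to cover every i admitted by Pre_count; fuel is only
-- a totality guard, the computation is step-for-step A's.
def countAux (a : List Int) (x : Int) : Nat → Int → Int
  | 0, _ => 0    -- fuel exhausted: unreachable under Pre_count (Python would recurse forever)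
  | n+1, i =>
    if i = (a.length : Int) - 1 then
      (if PySem.List.pyGet? a i = some x then 1 else 0)
    else
      let rest := countAux a x n (i + 1)
      if PySem.List.pyGet? a i = some x then rest + 1 else rest

def count (a : List Int) (x : Int) (i : Int) : Int :=
  countAux a x (2 * a.length + 1) i

-- ===== PORT B =====
def count_alt (a : List Int) (x : Int) (i : Int) : Int :=
  (PySem.List.pyRange i (a.length : Int) 1).foldl
    (fun total j => if PySem.List.pyGet? a j = some x then total + 1 else total) 0

-- ===== PRECONDITION & SPEC =====
-- Pre_ excludes exactly the inputs where the Python A raises: i >= len(a) (RecursionError,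
-- base case i == len(a)-1 is never met) and i < -len(a) (IndexError after the recursion).
def Pre_count (a : List Int) (x : Int) (i : Int) : Prop :=
  -(a.length : Int) ≤ i ∧ i < (a.length : Int)
instance (a : List Int) (x : Int) (i : Int) : Decidable (Pre_count a x i) := by
  unfold Pre_count; infer_instance

def pvWitness_count : List Int × Int × Int := ([1, 2, 1], 1, 0)

def Spec_count (a : List Int) (x : Int) (i : Int) (out : Int) : Prop := out = count_alt a x i
instance (a : List Int) (x : Int) (i : Int) (out : Int) : Decidable (Spec_count a x i out) := by
  unfold Spec_count; infer_instance

-- ===== CLAIM (what is proved, stated in full; the proofs are below) =====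
def Claim_equal_count : Prop := ∀ (a : List Int) (x : Int) (i : Int), Dom_count a x i → Pre_count a x i → Spec_count a x i (count a x i)

-- ===== LEMMAS AND PROOFS =====

-- B's loop as a sum of 0/1 indicators.
lemma count_alt_eq_sum (a : List Int) (x i : Int) :
    count_alt a x i =
      ((PySem.List.pyRange i (a.length : Int) 1).map
        (fun j => if PySem.List.pyGet? a j = some x then (1 : Int) else 0)).sum := by
  unfold count_alt
  have h : (fun (total : Int) (j : Int) =>
        if PySem.List.pyGet? a j = some x then total + 1 else total)
      = fun total j => total + (if PySem.List.pyGet? a j = some x then (1 : Int) else 0) := by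
    funext t j; split <;> simp
  rw [h, PySem.List.foldl_add]
  simp

-- A's recursion, given enough fuel, computes the same sum.
lemma countAux_eq (a : List Int) (x : Int) :
    ∀ (n : Nat) (i : Int), -(a.length : Int) ≤ i → i < (a.length : Int) →
      ((a.length : Int) - 1 - i).toNat < n →
      countAux a x n i = count_alt a x i := by
  intro n
  induction n with
  | zero => intro i _ _ h; omega
  | succ n ih =>
    intro i h1 h2 hfuel
    rw [count_alt_eq_sum]
    by_cases hbase : i = (a.length : Int) - 1
    · have hr : PySem.List.pyRange i (a.length : Int) 1 = [i] := by
        have : (a.length : Int) = i + 1 := by omega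
        rw [this]; exact PySem.List.pyRange_one_singleton i
      rw [hr]
      simp only [countAux, hbase, if_true, List.map_cons, List.map_nil, List.sum_cons,
        List.sum_nil, add_zero]
    · have hlt : i < (a.length : Int) - 1 := by omega
      have hcons := PySem.List.pyRange_one_cons (a := i) (b := (a.length : Int)) h2
      have hrest := ih (i + 1) (by omega) (by omega) (by omega)
      rw [count_alt_eq_sum] at hrest
      simp only [countAux, hbase, if_false, hcons, List.map_cons, List.sum_cons, hrest]
      split <;> omega

-- ===== VERDICT (by name: the statement is the Claim_ definition above) =====
theorem count_spec : Claim_equal_count := by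
  intro a x i _ hpre
  unfold Spec_count count
  exact countAux_eq a x (2 * a.length + 1) i hpre.1 hpre.2 (by
    rcases hpre with ⟨h1, h2⟩; omega)
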